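-- pv_equiv track=rewrite | github.com/Cyoda-platform/cyoda-ai-studio | application/agents/github/tool_definitions/repository/tools/analyze_structure_tool.py | _build_version_map
-- ===== SOURCE A (Python) =====
-- def _build_version_map(items: list, item_key: str) -> tuple[set, dict]:
--     """Build version map for items.
--
--     Args:
--         items: List of items
--         item_key: Key to extract name from item
--
--     Returns:
--         Tuple of (unique_names, version_map)
--     """
--     unique_names = set()
--     version_map = {}
--
--     for item in items:
--         name = item[item_key]
--         unique_names.add(name)
--         if name not in version_map:
--             version_map[name] = []
--         version = item['version'] or 'direct'
--         version_map[name].append(version)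
--
--     return unique_names, version_map
-- ===== SOURCE B (Python) =====
-- def _build_version_map(items: list, item_key: str) -> tuple[set, dict]:
--     # Stage 1: flatten each item to a (name, version) pair.
--     pairs = [(item[item_key], item['version'] or 'direct') for item in items]
--     # Stage 2: first-occurrence-ordered distinct names.
--     names = []
--     for n, _ in pairs:
--         if n not in names:
--             names.append(n)
--     # Stage 3: per name, collect its versions by filtering the pair list.
--     version_map = {n: [v for m, v in pairs if m == n] for n in names}
--     return set(names), version_map
-- ===== Notes on version B (the rewrite author's own statement) =====
-- stated objective: alternative
-- what changed: A's single lockstep pass maintaining a set and a membership-guarded dict of lists is replaced by three staged passes: flatten items to (name, version) pairs, dedup the names, then build each group by filtering the pair list per name (a nested-scan group-by).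
import Mathlib
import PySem

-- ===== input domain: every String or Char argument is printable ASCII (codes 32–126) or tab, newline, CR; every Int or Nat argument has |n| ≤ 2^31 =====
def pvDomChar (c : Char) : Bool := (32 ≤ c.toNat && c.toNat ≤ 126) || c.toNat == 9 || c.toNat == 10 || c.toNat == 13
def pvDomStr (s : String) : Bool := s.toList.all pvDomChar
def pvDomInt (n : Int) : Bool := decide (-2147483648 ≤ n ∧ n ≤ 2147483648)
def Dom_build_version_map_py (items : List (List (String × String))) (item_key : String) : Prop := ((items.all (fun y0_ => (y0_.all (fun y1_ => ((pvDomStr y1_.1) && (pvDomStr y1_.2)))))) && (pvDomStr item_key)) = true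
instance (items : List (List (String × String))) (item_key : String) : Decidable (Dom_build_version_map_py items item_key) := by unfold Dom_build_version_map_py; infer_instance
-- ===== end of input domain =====

-- B restates the task as a staged group-by: flatten to (name, version) pairs, dedup the names, then filter the pair list per name (same result, different traversal).

-- ===== PORT A =====
-- item[k]: total lookup via Dict.getD (KeyError excluded by Pre_)
def pvLookupA (item : List (String × String)) (k : String) : String :=
  (PySem.Dict.mk item).getD k ""

def build_version_map_py (items : List (List (String × String))) (item_key : String) : List String × (List (String × List String)) :=
  let st := items.foldl (fun (st : PySem.Set String × PySem.Dict String (List String)) item =>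
    let name := pvLookupA item item_key
    let unique_names := PySem.Set.add st.1 name
    let version_map := if st.2.contains name then st.2 else st.2.insert name []
    let v := pvLookupA item "version"
    let version := if v = "" then "direct" else v            -- item['version'] or 'direct'
    (unique_names, version_map.modify name [] (fun l => l ++ [version])))   -- version_map[name].append(version)
    (PySem.Set.empty, PySem.Dict.empty)
  (st.1, st.2.items)

-- ===== PORT B =====
def pvLookupB (item : List (String × String)) (k : String) : String :=
  (PySem.Dict.mk item).getD k ""

def build_version_map_py_alt (items : List (List (String × String))) (item_key : String) : List String × (List (String × List String)) :=
  -- Stage 1: pairs = [(item[item_key], item['version'] or 'direct') for item in items]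
  let pairs := items.map (fun item =>
    (pvLookupB item item_key,
     let v := pvLookupB item "version"
     if v = "" then "direct" else v))
  -- Stage 2: first-occurrence dedup of the names ('if n not in names: names.append(n)')
  let names := pairs.foldl (fun (acc : PySem.Set String) p => PySem.Set.add acc p.1) PySem.Set.empty
  -- Stage 3: {n: [v for m, v in pairs if m == n] for n in names}
  let version_map := names.map (fun n => (n, (pairs.filter (fun p => p.1 == n)).map (·.2)))
  (PySem.Set.ofList names, version_map)

-- ===== PRECONDITION & SPEC =====
-- Pre_ excludes exactly the inputs where Python A raises KeyError: some item lacks item_key or 'version'.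
def Pre_build_version_map_py (items : List (List (String × String))) (item_key : String) : Prop :=
  ∀ item ∈ items, item_key ∈ item.map (·.1) ∧ "version" ∈ item.map (·.1)
instance (items : List (List (String × String))) (item_key : String) : Decidable (Pre_build_version_map_py items item_key) := by unfold Pre_build_version_map_py; infer_instance
def pvWitness_build_version_map_py : (List (List (String × String))) × String :=
  ([[("name", "a"), ("version", "1.0")], [("name", "a"), ("version", "")]], "name")

def Spec_build_version_map_py (items : List (List (String × String))) (item_key : String) (out : List String × (List (String × List String))) : Prop := out = build_version_map_py_alt items item_key
instance (items : List (List (String × String))) (item_key : String) (out : List String × (List (String × List String))) : Decidable (Spec_build_version_map_py items item_key out) := by unfold Spec_build_version_map_py; infer_instance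

-- ===== CLAIM =====
def Claim_equal_build_version_map_py : Prop := ∀ (items : List (List (String × String))) (item_key : String), Dom_build_version_map_py items item_key → Pre_build_version_map_py items item_key → Spec_build_version_map_py items item_key (build_version_map_py items item_key)

-- ===== LEMMAS AND PROOFS =====

-- A's guarded insert-then-append equals a single modify
lemma stepA_dict_eq (d : PySem.Dict String (List String)) (k : String) (v : String) :
    (if d.contains k then d else d.insert k []).modify k [] (fun l => l ++ [v])
      = d.modify k [] (fun l => l ++ [v]) := by
  by_cases hc : d.contains k
  · simp [hc]
  · simp [hc, PySem.Dict.modify, PySem.Dict.getD_insert_self,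
      PySem.Dict.insert_insert_self,
      PySem.Dict.getD_of_not_contains d [] (eq_false_of_ne_true hc)]

-- one modify step adds its key to the key list exactly as Set.add does
lemma keys_modify_add (d : PySem.Dict String (List String)) (k : String) (f : List String → List String) :
    (d.modify k [] f).keys = PySem.Set.add d.keys k := by
  rw [PySem.Dict.keys_modify]
  by_cases hc : d.contains k
  · rw [PySem.Dict.keys_insert_of_contains _ _ hc,
      PySem.Set.add_of_mem ((PySem.Dict.contains_iff_mem_keys d k).mp hc)]
  · rw [PySem.Dict.keys_insert_of_not_contains _ _ (eq_false_of_ne_true hc),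
      PySem.Set.add_of_not_mem (fun h => hc ((PySem.Dict.contains_iff_mem_keys d k).mpr h))]

-- A's loop invariant: the running set is the running dict's key list
lemma loopA_eq (items : List (List (String × String))) (item_key : String)
    (s : PySem.Set String) (d : PySem.Dict String (List String)) (hs : s = d.keys) :
    items.foldl (fun (st : PySem.Set String × PySem.Dict String (List String)) item =>
      let name := pvLookupA item item_key
      let unique_names := PySem.Set.add st.1 name
      let version_map := if st.2.contains name then st.2 else st.2.insert name []
      let v := pvLookupA item "version"
      let version := if v = "" then "direct" else v
      (unique_names, version_map.modify name [] (fun l => l ++ [version]))) (s, d)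
    = (let d' := items.foldl (fun (d : PySem.Dict String (List String)) item =>
         let v := pvLookupA item "version"
         d.modify (pvLookupA item item_key) [] (fun l => l ++ [if v = "" then "direct" else v])) d
       (d'.keys, d')) := by
  induction items generalizing s d with
  | nil => simpa using hs
  | cons item rest ih =>
    simp only [List.foldl_cons]
    rw [stepA_dict_eq]
    exact hs ▸ ih _ _ (keys_modify_add d _ _).symm

-- a dict with Nodup keys is the map of getD over its keys
lemma dict_items_eq_keys_map (d : PySem.Dict String (List String)) (hnd : d.keys.Nodup) :
    d.items = d.keys.map (fun k => (k, d.getD k [])) := by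
  have : d.keys.map (fun k => (k, d.getD k [])) = d.items.map (fun p => (p.1, d.getD p.1 [])) := by
    simp only [PySem.Dict.keys, List.map_map]; rfl
  rw [this, List.map_congr_left, List.map_id]
  intro p hp
  obtain ⟨k, v⟩ := p
  simp [PySem.Dict.getD_of_mem_items d hp hnd []]

-- ===== VERDICT =====
theorem build_version_map_py_spec : Claim_equal_build_version_map_py := by
  intro items item_key _ _
  unfold Spec_build_version_map_py build_version_map_py build_version_map_py_alt
  rw [loopA_eq items item_key _ _ (by simp [PySem.Set.empty, PySem.Dict.keys_empty])]
  -- rewrite both sides over the pair list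
  set pairs := items.map (fun item =>
    (pvLookupA item item_key,
     let v := pvLookupA item "version"
     if v = "" then "direct" else v)) with hpairs
  have hfold : items.foldl (fun (d : PySem.Dict String (List String)) item =>
        let v := pvLookupA item "version"
        d.modify (pvLookupA item item_key) [] (fun l => l ++ [if v = "" then "direct" else v]))
        PySem.Dict.empty
      = pairs.foldl (fun d p => d.modify p.1 [] (fun l => l ++ [p.2])) PySem.Dict.empty := by
    rw [hpairs, List.foldl_map]
  have hkeys : (pairs.foldl (fun (d : PySem.Dict String (List String)) p =>
        d.modify p.1 [] (fun l => l ++ [p.2])) PySem.Dict.empty).keys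
      = PySem.Set.ofList (pairs.map (·.1)) := by
    rw [PySem.Dict.keys_foldl_modify_key pairs (·.1) [] (fun d p l => l ++ [p.2]) PySem.Dict.empty]
    rfl
  have hnames' : pairs.foldl (fun (acc : PySem.Set String) p => PySem.Set.add acc p.1) PySem.Set.empty
      = PySem.Set.ofList (pairs.map (·.1)) := by
    rw [PySem.Set.ofList_eq_foldl, List.foldl_map, hpairs, List.map_map, List.foldl_map]; rfl
  have hnd : (PySem.Set.ofList (pairs.map (·.1))).Nodup := PySem.Set.nodup_ofList _
  have hB : (fun (item : List (String × String)) =>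
      (pvLookupB item item_key,
       let v := pvLookupB item "version"
       if v = "" then "direct" else v)) = (fun item =>
      (pvLookupA item item_key,
       let v := pvLookupA item "version"
       if v = "" then "direct" else v)) := rfl
  simp only [hB, ← hpairs, hfold, hkeys]
  refine Prod.ext ?_ ?_
  · dsimp only
    rw [hnames', PySem.Set.ofList_eq_self_of_nodup _ hnd]
  · dsimp only
    rw [dict_items_eq_keys_map _ (by rw [hkeys]; exact hnd), hkeys, hnames']
    refine List.map_congr_left (fun n hn => ?_)
    have h := PySem.Dict.getD_foldl_modify_append (l := pairs) (d := PySem.Dict.empty) (c := n)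
    simp only [PySem.Dict.getD_empty, List.nil_append] at h
    simp [h]
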